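-- pv_equiv track=rewrite | github.com/StevenHSKim/Algorithms | 프로그래머스/2/340212. ［PCCP 기출문제］ 2번 ／ 퍼즐 게임 챌린지/［PCCP 기출문제］ 2번 ／ 퍼즐 게임 챌린지.py | solution
-- ===== SOURCE A (Python) =====
-- def solution(diffs, times, limit):
--     max_level = max(diffs)
--     answer = max_level
--     left = 1
--     right = max_level
--
--
--     while left < right:
--         level = int((left+right)/2)
--         time = 0
--
--         for i, diff in enumerate(diffs):
--             if level >= diff:
--                 time += times[i]
--             else:
--                 time += ((sum(times[i-1:i+1])*(diff-level)) + times[i])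
--
--         if time <= limit:
--             right = level
--             answer = level
--
--         else:
--             left = level + 1
--
--     return answer
-- ===== SOURCE B (Python) =====
-- def solution(diffs, times, limit):
--     pair_sums = [sum(times[i-1:i+1]) for i in range(len(diffs))]
--
--     def total(level):
--         return sum(times[i] if level >= d else pair_sums[i] * (d - level) + times[i]
--                    for i, d in enumerate(diffs))
--
--     def search(left, right):
--         if left >= right:
--             return right
--         mid = (left + right) // 2
--         if total(mid) <= limit:
--             return search(left, mid)
--         return search(mid + 1, right)
--
--     return search(1, max(diffs))
-- ===== Notes on version B (the rewrite author's own statement) =====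
-- stated objective: simpler
-- what changed: Exploits the invariant that A's answer variable always equals right to drop the accumulator entirely, replacing the imperative while-loop with a direct recursive search; the adjacent-pair slice sums are precomputed once instead of being re-sliced inside every probe, and the per-level total is a comprehension sum instead of an accumulator loop.
import Mathlib
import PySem

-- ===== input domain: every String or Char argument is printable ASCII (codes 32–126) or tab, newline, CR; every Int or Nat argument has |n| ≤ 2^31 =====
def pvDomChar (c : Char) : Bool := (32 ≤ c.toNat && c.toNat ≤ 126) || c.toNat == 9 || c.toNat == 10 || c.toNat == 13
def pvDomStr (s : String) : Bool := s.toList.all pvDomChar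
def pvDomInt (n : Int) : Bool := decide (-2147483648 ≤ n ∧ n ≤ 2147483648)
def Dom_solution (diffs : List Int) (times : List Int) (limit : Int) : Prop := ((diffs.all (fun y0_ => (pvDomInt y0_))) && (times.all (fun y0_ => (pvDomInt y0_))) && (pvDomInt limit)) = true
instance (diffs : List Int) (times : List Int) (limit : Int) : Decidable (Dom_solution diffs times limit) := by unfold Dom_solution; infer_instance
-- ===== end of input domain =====

-- B drops A's redundant answer accumulator (it always equals right), recursing instead of looping, with the pair sums precomputed once; objective: simpler.


-- ===== PORT A =====
-- A's inner for-loop: time accumulated over enumerate(diffs); times[i] is pyGetD (index in range under Pre_),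
-- sum(times[i-1:i+1]) is the sum of the Python slice (exact, including the i == 0 case).
def costA (diffs times : List Int) (level : Int) : Int :=
  (PySem.List.enumerate diffs 0).foldl (fun time p =>
    if level ≥ p.2 then time + PySem.List.pyGetD times p.1 0
    else time + ((PySem.List.slice times (some (p.1 - 1)) (some (p.1 + 1))).sum * (p.2 - level)
                  + PySem.List.pyGetD times p.1 0)) 0

-- A's while-loop; the fuel (right-left).toNat at entry only makes the recursion total, one unit per iteration.
-- level = int((left+right)/2): inside the loop 1 ≤ left < right, so truncating division equals floordiv (exact).
def loopA (diffs times : List Int) (limit : Int) : Nat → Int → Int → Int → Int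
  | 0, _, _, answer => answer
  | Nat.succ f, left, right, answer =>
    if left < right then
      let level := PySem.Int.floordiv (left + right) 2
      if costA diffs times level ≤ limit then
        loopA diffs times limit f left level level
      else
        loopA diffs times limit f (level + 1) right answer
    else answer

def solution (diffs : List Int) (times : List Int) (limit : Int) : Int :=
  let max_level := (PySem.List.max? diffs (fun y => y)).getD 0  -- max(diffs); raises on [], excluded by Pre_
  loopA diffs times limit (max_level - 1).toNat 1 max_level max_level

-- ===== PORT B =====
-- pair_sums = [sum(times[i-1:i+1]) for i in range(len(diffs))]
def pairSumsB (diffs times : List Int) : List Int :=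
  (PySem.List.pyRange 0 (diffs.length : Int) 1).map (fun i =>
    (PySem.List.slice times (some (i - 1)) (some (i + 1))).sum)

-- total(level): a comprehension sum over enumerate(diffs), looking the precomputed pair sums up
def totalB (diffs times pairSums : List Int) (level : Int) : Int :=
  ((PySem.List.enumerate diffs 0).map (fun p =>
    if level ≥ p.2 then PySem.List.pyGetD times p.1 0
    else PySem.List.pyGetD pairSums p.1 0 * (p.2 - level) + PySem.List.pyGetD times p.1 0)).sum

-- search(left, right): the recursion terminates because mid = (left+right)//2 satisfies left ≤ mid < right
def searchB (diffs times pairSums : List Int) (limit left right : Int) : Int :=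
  if h : left ≥ right then right
  else
    have hlr : left < right := by omega
    have hm := PySem.Int.floordiv_two_mid_bounds (lo := left) (hi := right) (by omega)
    have hme : PySem.Int.floordiv (left + right) 2 = (left + right) / 2 :=
      PySem.Int.floordiv_eq_ediv_of_pos (by omega)
    if totalB diffs times pairSums (PySem.Int.floordiv (left + right) 2) ≤ limit then
      searchB diffs times pairSums limit left (PySem.Int.floordiv (left + right) 2)
    else
      searchB diffs times pairSums limit (PySem.Int.floordiv (left + right) 2 + 1) right
termination_by (right - left).toNat
decreasing_by
  · rw [hme]; omega
  · rw [hme]; omega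

def solution_alt (diffs : List Int) (times : List Int) (limit : Int) : Int :=
  searchB diffs times (pairSumsB diffs times) limit 1
    ((PySem.List.max? diffs (fun y => y)).getD 0)

-- ===== PRECONDITION & SPEC =====
-- Pre_ excludes exactly the raising inputs: diffs = [] (max(diffs) raises ValueError), and, when the search
-- loop runs at all (some difficulty exceeds 1), times shorter than diffs (times[i] raises IndexError).
def Pre_solution (diffs : List Int) (times : List Int) (limit : Int) : Prop :=
  diffs ≠ [] ∧ ((∃ d ∈ diffs, 1 < d) → diffs.length ≤ times.length)
instance (diffs : List Int) (times : List Int) (limit : Int) : Decidable (Pre_solution diffs times limit) := by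
  unfold Pre_solution; infer_instance

def pvWitness_solution : List Int × List Int × Int := ([2, 3, 1], [1, 2, 1], 5)

def Spec_solution (diffs : List Int) (times : List Int) (limit : Int) (out : Int) : Prop := out = solution_alt diffs times limit
instance (diffs : List Int) (times : List Int) (limit : Int) (out : Int) : Decidable (Spec_solution diffs times limit out) := by unfold Spec_solution; infer_instance

-- ===== CLAIM (what is proved, stated in full; the proofs are below) =====
def Claim_equal_solution : Prop := ∀ (diffs : List Int) (times : List Int) (limit : Int), Dom_solution diffs times limit → Pre_solution diffs times limit → Spec_solution diffs times limit (solution diffs times limit)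

-- ===== LEMMAS AND PROOFS =====

-- every index produced by enumerate lies in [start, start + length)
theorem enum_index {α : Type} (xs : List α) : ∀ (s : Int) (q : Int × α),
    q ∈ PySem.List.enumerate xs s → s ≤ q.1 ∧ q.1 < s + xs.length := by
  induction xs with
  | nil => intro s q hq; simp [PySem.List.enumerate_nil] at hq
  | cons x xs ih =>
    intro s q hq
    rw [PySem.List.enumerate_cons] at hq
    rcases List.mem_cons.mp hq with rfl | hq'
    · refine ⟨le_refl _, ?_⟩
      simp only [List.length_cons]
      push_cast
      omega
    · have := ih (s + 1) q hq'
      simp only [List.length_cons]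
      push_cast at this ⊢
      omega

-- A's accumulator loop and B's comprehension with the precomputed pair sums agree per level
theorem costA_eq_totalB (diffs times : List Int) (level : Int) :
    costA diffs times level = totalB diffs times (pairSumsB diffs times) level := by
  unfold costA totalB
  have hfun : (fun (time : Int) (p : Int × Int) =>
      if level ≥ p.2 then time + PySem.List.pyGetD times p.1 0
      else time + ((PySem.List.slice times (some (p.1 - 1)) (some (p.1 + 1))).sum * (p.2 - level)
                    + PySem.List.pyGetD times p.1 0)) =
      (fun (time : Int) (p : Int × Int) => time +
        (if level ≥ p.2 then PySem.List.pyGetD times p.1 0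
         else (PySem.List.slice times (some (p.1 - 1)) (some (p.1 + 1))).sum * (p.2 - level)
              + PySem.List.pyGetD times p.1 0)) := by
    funext time p; split <;> rfl
  rw [hfun, PySem.List.foldl_add]
  have hmap : ∀ p ∈ PySem.List.enumerate diffs 0,
      (if level ≥ p.2 then PySem.List.pyGetD times p.1 0
       else (PySem.List.slice times (some (p.1 - 1)) (some (p.1 + 1))).sum * (p.2 - level)
            + PySem.List.pyGetD times p.1 0) =
      (if level ≥ p.2 then PySem.List.pyGetD times p.1 0
       else PySem.List.pyGetD (pairSumsB diffs times) p.1 0 * (p.2 - level)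
            + PySem.List.pyGetD times p.1 0) := by
    intro p hp
    have hidx := enum_index diffs 0 p hp
    have hps : PySem.List.pyGetD (pairSumsB diffs times) p.1 0
        = (PySem.List.slice times (some (p.1 - 1)) (some (p.1 + 1))).sum := by
      unfold pairSumsB
      exact PySem.List.pyGetD_map_pyRange_of_nonneg _ _ _ _ (by omega) (by omega)
    rw [hps]
  rw [List.map_congr_left hmap]
  ring

-- the while-loop's answer always equals right, so it computes B's accumulator-free recursion
theorem loopA_eq_searchB (diffs times : List Int) (limit : Int) :
    ∀ (fuel : Nat) (l r : Int), 1 ≤ l → l ≤ r → (r - l).toNat ≤ fuel →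
      loopA diffs times limit fuel l r r =
        searchB diffs times (pairSumsB diffs times) limit l r := by
  intro fuel
  induction fuel with
  | zero =>
    intro l r hl hlr hfuel
    have hlr' : l = r := by omega
    subst hlr'
    rw [searchB]
    simp only [loopA, ge_iff_le, le_refl, dite_true]
  | succ f ih =>
    intro l r hl hlr hfuel
    by_cases hguard : l < r
    · have hmid := PySem.Int.floordiv_two_mid_bounds (lo := l) (hi := r) hlr
      have hme : PySem.Int.floordiv (l + r) 2 = (l + r) / 2 :=
        PySem.Int.floordiv_eq_ediv_of_pos (by omega)
      have hmlt : PySem.Int.floordiv (l + r) 2 < r := by rw [hme]; omega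
      have hmge : l ≤ PySem.Int.floordiv (l + r) 2 := hmid.1
      rw [searchB]
      rw [dif_neg (by omega)]
      simp only [loopA, if_pos hguard]
      rw [← costA_eq_totalB]
      by_cases hfeas : costA diffs times (PySem.Int.floordiv (l + r) 2) ≤ limit
      · rw [if_pos hfeas, if_pos hfeas]
        exact ih l _ hl hmge (by omega)
      · rw [if_neg hfeas, if_neg hfeas]
        exact ih _ r (by omega) (by omega) (by omega)
    · have hlr' : l = r := by omega
      subst hlr'
      rw [searchB]
      simp only [loopA, if_neg hguard]
      rw [dif_pos (le_refl _)]

-- ===== VERDICT (by name: the statement is the Claim_ definition above) =====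
theorem solution_spec : Claim_equal_solution := by
  intro diffs times limit _hdom _hpre
  unfold Spec_solution solution solution_alt
  set M := (PySem.List.max? diffs (fun y => y)).getD 0 with hM
  show loopA diffs times limit (M - 1).toNat 1 M M =
    searchB diffs times (pairSumsB diffs times) limit 1 M
  by_cases h1 : 1 ≤ M
  · exact loopA_eq_searchB diffs times limit ((M - 1).toNat) 1 M le_rfl h1 (by omega)
  · have h0 : (M - 1).toNat = 0 := by omega
    rw [h0]
    simp only [loopA]
    rw [searchB]
    rw [dif_pos (by omega)]
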